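-- pv_equiv track=rewrite | github.com/MrBrantCode/unitest_baseline | mut_generate/mist_train_cf/cf_82017/solution.py | multiplication_table_for_primes
-- ===== SOURCE A (Python) =====
-- def multiplication_table_for_primes(n):
--     def prime_numbers(n):
--         primes = []
--         for possiblePrime in range(2, n + 1):
--             isPrime = True
--             for num in range(2, int(possiblePrime ** 0.5) + 1):
--                 if possiblePrime % num == 0:
--                     isPrime = False
--             if isPrime:
--                 primes.append(possiblePrime)
--         return primes
--
--     primes = prime_numbers(n)
--     table = []
--     for i in range(len(primes)):
--         row = []
--         for j in range(len(primes)):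
--             row.append(primes[i] * primes[j])
--         table.append(row)
--     return table
-- ===== SOURCE B (Python) =====
-- def multiplication_table_for_primes(n):
--     # Sieve of Eratosthenes instead of per-candidate trial division.
--     if n < 2:
--         primes = []
--     else:
--         is_prime = [True] * (n + 1)
--         is_prime[0] = False
--         is_prime[1] = False
--         i = 2
--         while i * i <= n:
--             for j in range(i * i, n + 1, i):
--                 is_prime[j] = False
--             i += 1
--         primes = [k for k in range(2, n + 1) if is_prime[k]]
--     return [[p * q for q in primes] for p in primes]
-- ===== Notes on version B (the rewrite author's own statement) =====
-- stated objective: alternative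
-- what changed: Prime generation by trial division of every candidate up to its square root is replaced by a sieve of Eratosthenes (marking multiples of each i from i*i upward in a boolean array), and the index-based nested table loop becomes a direct comprehension over the prime list; overall runtime is dominated by the quadratic-size output table, so no speedup is claimed.
import Mathlib
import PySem

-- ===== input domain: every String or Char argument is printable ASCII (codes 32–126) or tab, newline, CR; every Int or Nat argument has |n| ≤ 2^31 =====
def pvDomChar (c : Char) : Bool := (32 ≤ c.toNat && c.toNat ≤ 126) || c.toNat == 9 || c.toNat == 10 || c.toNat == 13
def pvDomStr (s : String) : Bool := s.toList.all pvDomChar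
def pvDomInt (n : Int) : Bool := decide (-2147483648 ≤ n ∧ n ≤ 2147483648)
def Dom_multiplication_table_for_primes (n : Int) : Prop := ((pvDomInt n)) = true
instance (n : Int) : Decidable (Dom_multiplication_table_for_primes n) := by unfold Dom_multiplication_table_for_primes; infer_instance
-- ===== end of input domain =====

-- B replaces A's per-candidate trial division with a Sieve of Eratosthenes and the
-- index-based table loops with a direct map over the prime list (alternative algorithm).


-- ===== PORT A =====
-- inner loop of prime_numbers: `int(possiblePrime ** 0.5)` is ported as Int.sqrt, which is
-- exact here: for 0 ≤ p ≤ 2^31 the double sqrt/pow is exact enough that int(p**0.5) = isqrt(p)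
def pvIsPrimeA (p : Int) : Bool :=
  (PySem.List.pyRange 2 (Int.sqrt p + 1) 1).foldl
    (fun isPrime num => if PySem.Int.mod p num == 0 then false else isPrime) true

def pvPrimesA (n : Int) : List Int :=
  (PySem.List.pyRange 2 (n + 1) 1).foldl
    (fun primes p => if pvIsPrimeA p then primes ++ [p] else primes) []

def multiplication_table_for_primes (n : Int) : List (List Int) :=
  let primes := pvPrimesA n
  (PySem.List.pyRange 0 (primes.length : Int) 1).foldl
    (fun table i =>
      table ++ [(PySem.List.pyRange 0 (primes.length : Int) 1).foldl
        (fun row j => row ++ [PySem.List.pyGetD primes i 0 * PySem.List.pyGetD primes j 0]) []])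
    []

-- ===== PORT B =====
-- `for j in range(i*i, n+1, i): is_prime[j] = False` (all indices are in range, so List.set
-- with j.toNat is exact: j ≥ i*i ≥ 0 and j ≤ n < length)
def pvMark (nn : Nat) (i : Nat) (arr : List Bool) : List Bool :=
  (PySem.List.pyRange ((i : Int) * (i : Int)) ((nn : Int) + 1) (i : Int)).foldl
    (fun a j => a.set j.toNat false) arr

-- the `while i * i <= n` loop
def pvSieve (nn : Nat) (i : Nat) (arr : List Bool) : List Bool :=
  if i * i ≤ nn then pvSieve nn (i + 1) (pvMark nn i arr) else arr
  termination_by nn + 1 - i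
  decreasing_by
    rcases Nat.eq_zero_or_pos i with h0 | h0
    · omega
    · have := Nat.le_mul_of_pos_left i h0; omega

def multiplication_table_for_primes_alt (n : Int) : List (List Int) :=
  let primes : List Int :=
    if n < 2 then []
    else
      let nn := n.toNat
      let arr := pvSieve nn 2 (((List.replicate (nn + 1) true).set 0 false).set 1 false)
      (PySem.List.pyRange 2 (n + 1) 1).filter (fun k => arr.getD k.toNat false)
  primes.map (fun p => primes.map (fun q => p * q))

-- ===== PRECONDITION & SPEC =====
def Spec_multiplication_table_for_primes (n : Int) (out : List (List Int)) : Prop := out = multiplication_table_for_primes_alt n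
instance (n : Int) (out : List (List Int)) : Decidable (Spec_multiplication_table_for_primes n out) := by unfold Spec_multiplication_table_for_primes; infer_instance

-- ===== CLAIM (what is proved, stated in full; the proofs are below) =====
def Claim_equal_multiplication_table_for_primes : Prop := ∀ (n : Int), Dom_multiplication_table_for_primes n → Spec_multiplication_table_for_primes n (multiplication_table_for_primes n)

-- ===== LEMMAS AND PROOFS =====

-- the abstract primality test both programs compute: no divisor d with 2 ≤ d and d*d ≤ p
def pvNoSmallDiv (p : Int) : Prop := ∀ d : Int, 2 ≤ d → d * d ≤ p → ¬ d ∣ p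

-- A's inner flag fold is an `all` over the range
lemma pvFoldFlag (c : Int → Bool) (l : List Int) (b : Bool) :
    l.foldl (fun acc x => if c x then false else acc) b = (b && l.all (fun x => !c x)) := by
  induction l generalizing b with
  | nil => simp
  | cons x xs ih =>
      simp only [List.foldl_cons, List.all_cons, ih]
      by_cases h : c x <;> simp [h]

-- Int.sqrt bracket (from Nat.le_sqrt)
lemma pvLeSqrt (d p : Int) (hd : 0 ≤ d) (hp : 0 ≤ p) : d ≤ Int.sqrt p ↔ d * d ≤ p := by
  obtain ⟨a, rfl⟩ := Int.eq_ofNat_of_zero_le hd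
  obtain ⟨b, rfl⟩ := Int.eq_ofNat_of_zero_le hp
  rw [Int.sqrt_natCast]
  exact_mod_cast Nat.le_sqrt

lemma pvIsPrimeA_iff (p : Int) (hp : 0 ≤ p) : pvIsPrimeA p = true ↔ pvNoSmallDiv p := by
  unfold pvIsPrimeA
  rw [pvFoldFlag]
  simp only [Bool.true_and, List.all_eq_true, PySem.List.mem_pyRange_one]
  constructor
  · intro h d h2 hdd hdvd
    have hlt : d < Int.sqrt p + 1 := by
      have := (pvLeSqrt d p (by omega) hp).mpr hdd; omega
    have := h d ⟨h2, hlt⟩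
    rw [Bool.not_eq_eq_eq_not, Bool.not_true, beq_eq_false_iff_ne] at this
    exact this ((PySem.Int.mod_eq_zero_iff_dvd p d).mpr hdvd)
  · intro h d hd
    have hdd : d * d ≤ p := (pvLeSqrt d p (by omega) hp).mp (by omega)
    rw [Bool.not_eq_eq_eq_not, Bool.not_true, beq_eq_false_iff_ne]
    intro hmod
    exact h d hd.1 hdd ((PySem.Int.mod_eq_zero_iff_dvd p d).mp hmod)

-- effect of the marking fold on one cell
lemma pvFoldSet_getD (L : List Int) (hL : ∀ j ∈ L, 0 ≤ j) (arr : List Bool) (k : Nat) :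
    (L.foldl (fun a j => a.set j.toNat false) arr).getD k false
      = (arr.getD k false && !L.contains (k : Int)) := by
  induction L generalizing arr with
  | nil => simp
  | cons j L ih =>
      simp only [List.foldl_cons, List.contains_cons]
      rw [ih (fun x hx => hL x (List.mem_cons_of_mem _ hx))]
      by_cases h : j = (k : Int)
      · subst h
        have hset : (arr.set k false)[k]?.getD false = false := by
          rcases Nat.lt_or_ge k arr.length with hlt | hge
          · simp [hlt]
          · simp [Nat.not_lt.mpr hge]
        simp [Int.toNat_natCast, List.getD, hset]
      · have hne : j.toNat ≠ k := by
          have hj : 0 ≤ j := hL j (List.mem_cons_self ..)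
          omega
        rw [List.getD, List.getElem?_set_ne hne, ← List.getD,
          show ((k : Int) == j) = false from beq_eq_false_iff_ne.mpr (Ne.symm h)]
        simp

-- membership in the marking range `range(i*i, nn+1, i)` over Nat indices
lemma pvMemMark (nn i : Nat) (hi : 0 < i) (k : Nat) :
    ((k : Int) ∈ PySem.List.pyRange ((i : Int) * (i : Int)) ((nn : Int) + 1) (i : Int))
      ↔ (i * i ≤ k ∧ k ≤ nn ∧ i ∣ k) := by
  rw [PySem.List.mem_pyRange_iff_of_pos (by exact_mod_cast hi)]
  constructor
  · rintro ⟨h1, h2, d, hd⟩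
    refine ⟨by exact_mod_cast h1, by omega, ?_⟩
    have : (k : Int) = i * (d + i) := by linarith
    have hdvd : (i : Int) ∣ (k : Int) := ⟨d + i, this⟩
    exact_mod_cast hdvd
  · rintro ⟨h1, h2, hdvd⟩
    have hdvd' : (i : Int) ∣ (k : Int) := by exact_mod_cast hdvd
    obtain ⟨c, hc⟩ := hdvd'
    exact ⟨by exact_mod_cast h1, by omega, c - i, by linarith⟩

lemma pvMark_getD (nn i : Nat) (hi : 0 < i) (arr : List Bool) (k : Nat) :
    (pvMark nn i arr).getD k false = true
      ↔ arr.getD k false = true ∧ ¬ (i * i ≤ k ∧ k ≤ nn ∧ i ∣ k) := by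
  unfold pvMark
  rw [pvFoldSet_getD _ (fun j hj => ?_) arr k]
  · rw [Bool.and_eq_true, Bool.not_eq_eq_eq_not, Bool.not_true, ← pvMemMark nn i hi k]
    simp
  · rw [PySem.List.mem_pyRange_iff_of_pos (by exact_mod_cast hi)] at hj
    have : (0 : Int) ≤ i * i := by positivity
    omega

lemma pvSieve_getD (nn i : Nat) (arr : List Bool) : ∀ (k : Nat), 0 < i →
    ((pvSieve nn i arr).getD k false = true
      ↔ arr.getD k false = true ∧ ¬ ∃ j, i ≤ j ∧ j * j ≤ k ∧ k ≤ nn ∧ j ∣ k) := by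
  induction i, arr using pvSieve.induct (nn := nn) with
  | case1 i arr h ih =>
      intro k hi
      rw [pvSieve, if_pos h, ih k (by omega), pvMark_getD nn i hi arr k]
      constructor
      · rintro ⟨⟨ha, hni⟩, hne⟩
        refine ⟨ha, ?_⟩
        rintro ⟨j, hj, hjj, hkn, hdvd⟩
        rcases eq_or_lt_of_le hj with rfl | hj'
        · exact hni ⟨hjj, hkn, hdvd⟩
        · exact hne ⟨j, by omega, hjj, hkn, hdvd⟩
      · rintro ⟨ha, hne⟩
        exact ⟨⟨ha, fun ⟨h1, h2, h3⟩ => hne ⟨i, le_refl i, h1, h2, h3⟩⟩,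
          fun ⟨j, hj, rest⟩ => hne ⟨j, by omega, rest⟩⟩
  | case2 i arr h =>
      intro k hi
      rw [pvSieve, if_neg h]
      constructor
      · intro ha
        refine ⟨ha, ?_⟩
        rintro ⟨j, hj, hjj, hkn, -⟩
        have : i * i ≤ j * j := Nat.mul_le_mul hj hj
        omega
      · exact fun h => h.1

lemma pvInit_getD (nn k : Nat) :
    ((((List.replicate (nn + 1) true).set 0 false).set 1 false).getD k false = true)
      ↔ (2 ≤ k ∧ k ≤ nn) := by
  simp [List.getD, List.getElem?_set, List.getElem?_replicate]
  split_ifs <;> simp <;> omega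

-- bridge between the Nat-indexed sieve condition and the Int divisor condition
lemma pvNoSmallDiv_nat (k : Nat) :
    (¬ ∃ j : Nat, 2 ≤ j ∧ j * j ≤ k ∧ j ∣ k) ↔ pvNoSmallDiv (k : Int) := by
  unfold pvNoSmallDiv
  constructor
  · intro hne d h2 hdd hdvd
    apply hne
    have hd0 : 0 ≤ d := by omega
    refine ⟨d.toNat, by omega, ?_, ?_⟩
    · have : (d.toNat : Int) * (d.toNat : Int) ≤ (k : Int) := by
        rw [Int.toNat_of_nonneg hd0]; exact hdd
      exact_mod_cast this
    · have : (d.toNat : Int) ∣ (k : Int) := by rw [Int.toNat_of_nonneg hd0]; exact hdvd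
      exact_mod_cast this
  · rintro h ⟨j, hj, hjj, hdvd⟩
    exact h (j : Int) (by exact_mod_cast hj) (by exact_mod_cast hjj) (by exact_mod_cast hdvd)

-- final characterisation of a sieve cell
lemma pvSieveCell (nn k : Nat) (h2 : 2 ≤ k) (hk : k ≤ nn) :
    (pvSieve nn 2 (((List.replicate (nn + 1) true).set 0 false).set 1 false)).getD k false = true
      ↔ pvNoSmallDiv (k : Int) := by
  rw [pvSieve_getD nn 2 _ k (by norm_num), pvInit_getD, ← pvNoSmallDiv_nat k]
  constructor
  · rintro ⟨-, hne⟩ ⟨j, h1, hjj, h3⟩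
    exact hne ⟨j, h1, hjj, hk, h3⟩
  · rintro hne
    refine ⟨⟨h2, hk⟩, ?_⟩
    rintro ⟨j, h1, hjj, -, h3⟩
    exact hne ⟨j, h1, hjj, h3⟩

-- the two prime lists agree
lemma pvPrimes_eq (n : Int) :
    pvPrimesA n
      = (if n < 2 then []
         else (PySem.List.pyRange 2 (n + 1) 1).filter
           (fun k => (pvSieve n.toNat 2 (((List.replicate (n.toNat + 1) true).set 0 false).set 1 false)).getD k.toNat false)) := by
  unfold pvPrimesA
  rw [PySem.List.foldl_append_if_eq_filter, List.nil_append]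
  by_cases hn : n < 2
  · rw [if_pos hn, PySem.List.pyRange_one_eq_nil (by omega), List.filter_nil]
  · rw [if_neg hn]
    refine List.filter_congr (fun x hx => ?_)
    rw [PySem.List.mem_pyRange_one] at hx
    rw [Bool.eq_iff_iff, pvIsPrimeA_iff x (by omega),
      pvSieveCell n.toNat x.toNat (by omega) (by omega),
      Int.toNat_of_nonneg (by omega : (0:Int) ≤ x)]

-- A's nested index fold over any list is the nested map
lemma pvTable_eq (primes : List Int) :
    (PySem.List.pyRange 0 (primes.length : Int) 1).foldl
      (fun table i =>
        table ++ [(PySem.List.pyRange 0 (primes.length : Int) 1).foldl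
          (fun row j => row ++ [PySem.List.pyGetD primes i 0 * PySem.List.pyGetD primes j 0]) []])
      []
      = primes.map (fun p => primes.map (fun q => p * q)) := by
  have hinner : ∀ c : Int,
      (PySem.List.pyRange 0 (primes.length : Int) 1).foldl
        (fun row j => row ++ [c * PySem.List.pyGetD primes j 0]) []
        = primes.map (fun q => c * q) := by
    intro c
    rw [PySem.List.foldl_append_singleton_eq_map (f := fun j => c * PySem.List.pyGetD primes j 0),
      List.nil_append,
      show (fun j => c * PySem.List.pyGetD primes j 0)
        = (fun q => c * q) ∘ (fun j => PySem.List.pyGetD primes j 0) from rfl,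
      ← List.map_map, PySem.List.map_pyGetD_pyRange_zero']
  rw [PySem.List.foldl_append_singleton_eq_map
      (f := fun i => (PySem.List.pyRange 0 (primes.length : Int) 1).foldl
        (fun row j => row ++ [PySem.List.pyGetD primes i 0 * PySem.List.pyGetD primes j 0]) []),
    List.nil_append]
  simp only [hinner]
  rw [show (fun i => primes.map (fun q => PySem.List.pyGetD primes i 0 * q))
      = (fun p => primes.map (fun q => p * q)) ∘ (fun i => PySem.List.pyGetD primes i 0) from rfl,
    ← List.map_map, PySem.List.map_pyGetD_pyRange_zero']

-- ===== VERDICT (by name: the statement is the Claim_ definition above) =====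
theorem multiplication_table_for_primes_spec : Claim_equal_multiplication_table_for_primes := by
  intro n _
  unfold Spec_multiplication_table_for_primes multiplication_table_for_primes multiplication_table_for_primes_alt
  simp only []
  rw [pvTable_eq, pvPrimes_eq]
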